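-- pv_equiv track=rewrite | github.com/JongKyuHong/TIL | Algorithm/20210718/더맵게2.py | solution
-- ===== SOURCE A (Python) =====
-- import heapq
--
-- def solution(scoville,K):
--     heapq.heapify(scoville)
--     count = 0
--     while scoville[0] < K:
--         if len(scoville) > 1:
--             heapq.heappush(scoville,heapq.heappop(scoville) + heapq.heappop(scoville)*2)
--             count += 1
--         else:
--             return -1
--     return count
-- ===== SOURCE B (Python) =====
-- def solution(scoville, K):
--     scoville = sorted(scoville)
--     count = 0
--     while scoville[0] < K:
--         if len(scoville) == 1:
--             return -1
--         a = scoville.pop(0)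
--         b = scoville.pop(0)
--         c = a + 2 * b
--         i = 0
--         while i < len(scoville) and scoville[i] < c:
--             i += 1
--         scoville.insert(i, c)
--         count += 1
--     return count
-- ===== Notes on version B (the rewrite author's own statement) =====
-- stated objective: idiomatic
-- what changed: Replaces the binary heap (heapify + heappop/heappush) with a single initial sort and an ordered-insertion scan that keeps the working list fully sorted, so the two smallest items are always the first two elements; return value only, A heap-reorders its argument in place while B does not.
-- outside the precondition, e.g. on solution([], 5): A raises IndexError, B raises IndexError
import Mathlib
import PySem

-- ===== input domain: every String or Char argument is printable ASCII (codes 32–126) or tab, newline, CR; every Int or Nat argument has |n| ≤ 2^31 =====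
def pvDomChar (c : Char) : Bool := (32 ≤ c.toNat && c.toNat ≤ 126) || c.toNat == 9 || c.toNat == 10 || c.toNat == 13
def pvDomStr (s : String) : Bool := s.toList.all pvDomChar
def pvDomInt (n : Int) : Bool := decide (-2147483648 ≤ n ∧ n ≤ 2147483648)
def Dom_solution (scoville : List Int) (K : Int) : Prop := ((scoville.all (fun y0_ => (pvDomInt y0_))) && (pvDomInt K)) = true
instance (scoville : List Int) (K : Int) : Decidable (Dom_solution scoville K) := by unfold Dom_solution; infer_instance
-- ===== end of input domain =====

-- B replaces the heap with a one-time sort plus ordered reinsertion (no heapq); equivalence is about the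
-- RETURN value only: A reorders its argument list in place (heapify), B leaves the caller's list unchanged.

-- ===== PORT A =====
-- heapq is modelled by its contract: the heap is the multiset of its elements, scoville[0] (the root) is
-- the minimum, heappop removes one minimum occurrence, heappush adds the element. This is exact for the
-- return value: solution only observes popped VALUES and the length, which depend only on the multiset.
def heapLoop (K : Int) (h : List Int) (count : Int) : Int :=
  match hm : h.min? with
  | none => 0  -- empty heap: Python raises IndexError here (excluded by Pre_solution)
  | some m =>
    if m < K then
      if 1 < h.length then
        match hm2 : (h.erase m).min? with
        | none => 0  -- unreachable: h.erase m is nonempty when 1 < h.length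
        | some m2 => heapLoop K ((h.erase m).erase m2 ++ [m + m2 * 2]) (count + 1)
      else -1
    else count
termination_by h.length
decreasing_by
  have h1m : m ∈ h := List.min?_mem hm
  have h2m : m2 ∈ h.erase m := List.min?_mem hm2
  have e1 : (h.erase m).length = h.length - 1 := List.length_erase_of_mem h1m
  have e2 : ((h.erase m).erase m2).length = (h.erase m).length - 1 := List.length_erase_of_mem h2m
  simp only [List.length_append, List.length_cons, List.length_nil, e2, e1]
  omega

def solution (scoville : List Int) (K : Int) : Int :=
  heapLoop K scoville 0

-- ===== PORT B =====
-- the manual insertion scan of Source B: insert c before the first element ≥ c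
def insSorted (c : Int) : List Int → List Int
  | [] => [c]
  | x :: t => if x < c then x :: insSorted c t else c :: x :: t

theorem length_insSorted (c : Int) (s : List Int) : (insSorted c s).length = s.length + 1 := by
  induction s with
  | nil => rfl
  | cons x t ih => simp only [insSorted]; split <;> simp [ih]

def sortedLoop (K : Int) (s : List Int) (count : Int) : Int :=
  match s with
  | [] => -2  -- empty list: Python raises IndexError here (excluded by Pre_solution; unreachable from a nonempty start)
  | [x] => if x < K then -1 else count
  | a :: b :: rest =>
    if a < K then sortedLoop K (insSorted (a + 2 * b) rest) (count + 1) else count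
termination_by s.length
decreasing_by simp [length_insSorted]

def solution_alt (scoville : List Int) (K : Int) : Int :=
  sortedLoop K (PySem.List.sorted scoville (fun x => x) false) 0

-- ===== PRECONDITION & SPEC =====
-- Pre_ excludes only the empty list, on which both Pythons raise IndexError at scoville[0].
def Pre_solution (scoville : List Int) (K : Int) : Prop := scoville ≠ []
instance (scoville : List Int) (K : Int) : Decidable (Pre_solution scoville K) := by unfold Pre_solution; infer_instance
def pvWitness_solution : List Int × Int := ([1, 2, 3, 9, 10, 12], 7)

def Spec_solution (scoville : List Int) (K : Int) (out : Int) : Prop := out = solution_alt scoville K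
instance (scoville : List Int) (K : Int) (out : Int) : Decidable (Spec_solution scoville K out) := by unfold Spec_solution; infer_instance

-- ===== CLAIM (what is proved, stated in full; the proofs are below) =====
def Claim_equal_solution : Prop := ∀ (scoville : List Int) (K : Int), Dom_solution scoville K → Pre_solution scoville K → Spec_solution scoville K (solution scoville K)

-- ===== LEMMAS AND PROOFS =====

theorem min?_eq_head_of_sorted {a : Int} {t : List Int} (hs : (a :: t).Pairwise (· ≤ ·)) :
    (a :: t).min? = some a := by
  rw [List.min?_eq_some_iff]
  rw [List.pairwise_cons] at hs
  refine ⟨List.mem_cons_self, fun b hb => ?_⟩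
  rcases List.mem_cons.mp hb with rfl | hb
  · exact le_refl _
  · exact hs.1 b hb

theorem min?_eq_of_perm {h s : List Int} (hp : h.Perm s) : h.min? = s.min? := by
  cases hh : h.min? with
  | none =>
    have h0 : h = [] := List.min?_eq_none_iff.mp hh
    subst h0
    have h1 : s = [] := hp.symm.eq_nil
    subst h1
    rfl
  | some m =>
    symm
    rw [List.min?_eq_some_iff] at hh ⊢
    exact ⟨hp.mem_iff.mp hh.1, fun b hb => hh.2 b (hp.mem_iff.mpr hb)⟩

theorem perm_insSorted (c : Int) (s : List Int) : (insSorted c s).Perm (c :: s) := by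
  induction s with
  | nil => rfl
  | cons x t ih =>
    simp only [insSorted]
    split
    · exact (ih.cons x).trans (List.Perm.swap c x t)
    · rfl

theorem sorted_insSorted (c : Int) {s : List Int} (hs : s.Pairwise (· ≤ ·)) :
    (insSorted c s).Pairwise (· ≤ ·) := by
  induction s with
  | nil => simp [insSorted]
  | cons x t ih =>
    rw [List.pairwise_cons] at hs
    simp only [insSorted]
    split
    · rename_i hx
      rw [List.pairwise_cons]
      refine ⟨fun b hb => ?_, ih hs.2⟩
      rcases List.mem_cons.mp ((perm_insSorted c t).mem_iff.mp hb) with rfl | hb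
      · exact le_of_lt hx
      · exact hs.1 b hb
    · rename_i hx
      rw [List.pairwise_cons]
      refine ⟨fun b hb => ?_, List.pairwise_cons.mpr hs⟩
      rcases List.mem_cons.mp hb with rfl | hb
      · exact le_of_not_gt hx
      · exact le_trans (le_of_not_gt hx) (hs.1 b hb)

-- the loop correspondence: a heap state permuting a sorted state gives equal results
theorem insSorted_ne_nil (c : Int) (s : List Int) : insSorted c s ≠ [] := by
  cases s with
  | nil => simp [insSorted]
  | cons x t => simp only [insSorted]; split <;> simp

theorem heapLoop_eq_sortedLoop (K : Int) :
    ∀ n (h s : List Int) (count : Int), h.length = n → h.Perm s → s.Pairwise (· ≤ ·) → s ≠ [] →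
      heapLoop K h count = sortedLoop K s count := by
  intro n
  induction n using Nat.strong_induction_on with
  | _ n ih =>
    intro h s count hlen hp hs hne
    match s with
    | [] => exact absurd rfl hne
    | [a] =>
      have hmin : h.min? = some a := (min?_eq_of_perm hp).trans (min?_eq_head_of_sorted hs)
      have hl : h.length = 1 := hp.length_eq
      rw [heapLoop, sortedLoop]
      split
      · rename_i heq; simp [hmin] at heq
      · rename_i m heq
        rw [hmin] at heq
        injection heq with hma
        subst hma
        simp [hl]
    | a :: b :: rest =>
      have hmin : h.min? = some a := (min?_eq_of_perm hp).trans (min?_eq_head_of_sorted hs)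
      have hl : h.length = rest.length + 2 := by simpa using hp.length_eq
      have hs2 : (b :: rest).Pairwise (· ≤ ·) := hs.of_cons
      have hp1 : (h.erase a).Perm (b :: rest) := by
        have := hp.erase a
        simpa [List.erase_cons_head] using this
      have hmin2 : (h.erase a).min? = some b :=
        (min?_eq_of_perm hp1).trans (min?_eq_head_of_sorted hs2)
      have hp2 : ((h.erase a).erase b).Perm rest := by
        have := hp1.erase b
        simpa [List.erase_cons_head] using this
      have hlt : 1 < h.length := by omega
      rw [heapLoop, sortedLoop]
      split
      · rename_i heq; simp [hmin] at heq
      · rename_i m heq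
        rw [hmin] at heq
        injection heq with hma
        subst hma
        by_cases hK : a < K
        · simp only [hK, if_pos, hlt]
          split
          · rename_i heq2; simp [hmin2] at heq2
          · rename_i m2 heq2
            rw [hmin2] at heq2
            injection heq2 with hmb
            subst hmb
            rw [show a + b * 2 = a + 2 * b from by ring]
            have hpnew : ((h.erase a).erase b ++ [a + 2 * b]).Perm (insSorted (a + 2 * b) rest) := by
              have h1 : ((h.erase a).erase b ++ [a + 2 * b]).Perm ((a + 2 * b) :: rest) :=
                (hp2.append_right [a + 2 * b]).trans (List.perm_append_singleton _ _)
              exact h1.trans (perm_insSorted (a + 2 * b) rest).symm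
            have hlnew : ((h.erase a).erase b ++ [a + 2 * b]).length = rest.length + 1 := by
              simpa using hp2.length_eq
            exact ih (rest.length + 1) (by omega) _ _ _ hlnew hpnew
              (sorted_insSorted _ hs2.of_cons) (insSorted_ne_nil _ _)
        · simp [hK]

-- ===== VERDICT (by name: the statement is the Claim_ definition above) =====
theorem solution_spec : Claim_equal_solution := by
  intro scoville K _ hpre
  unfold Spec_solution solution solution_alt
  exact heapLoop_eq_sortedLoop K scoville.length scoville _ 0 rfl
    (PySem.List.sorted_perm scoville (fun x => x) false).symm
    (by simpa using PySem.List.sorted_pairwise (xs := scoville) (key := fun x => x))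
    (fun h => hpre ((h ▸ PySem.List.sorted_perm scoville (fun x => x) false :
      ([] : List Int).Perm scoville)).symm.eq_nil)
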